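-- pv_equiv track=rewrite | github.com/choibigo/Study | 알고리즘 문제풀이/백준 알고리즘 Class 1/음계.py | func
-- ===== SOURCE A (Python) =====
-- def func(num_list):
--     offset = num_list[1]-num_list[0]
--
--     if abs(offset) != 1:
--         return "mixed"
--
--     for i in range(2, len(num_list)):
--         if num_list[i] - num_list[i-1] != offset:
--             return "mixed"
--
--     if offset==1:
--         return "ascending"
--     else:
--         return "descending"
-- ===== SOURCE B (Python) =====
-- def func(num_list):
--     offset = num_list[1] - num_list[0]
--     if abs(offset) != 1:
--         return "mixed"
--     expected = [num_list[0] + offset * i for i in range(len(num_list))]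
--     if num_list == expected:
--         return "ascending" if offset == 1 else "descending"
--     return "mixed"
-- ===== Notes on version B (the rewrite author's own statement) =====
-- stated objective: alternative
-- what changed: The pairwise consecutive-difference scan with early return is replaced by constructing the expected arithmetic progression from the first element and step, then one whole-list equality comparison.
import Mathlib
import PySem

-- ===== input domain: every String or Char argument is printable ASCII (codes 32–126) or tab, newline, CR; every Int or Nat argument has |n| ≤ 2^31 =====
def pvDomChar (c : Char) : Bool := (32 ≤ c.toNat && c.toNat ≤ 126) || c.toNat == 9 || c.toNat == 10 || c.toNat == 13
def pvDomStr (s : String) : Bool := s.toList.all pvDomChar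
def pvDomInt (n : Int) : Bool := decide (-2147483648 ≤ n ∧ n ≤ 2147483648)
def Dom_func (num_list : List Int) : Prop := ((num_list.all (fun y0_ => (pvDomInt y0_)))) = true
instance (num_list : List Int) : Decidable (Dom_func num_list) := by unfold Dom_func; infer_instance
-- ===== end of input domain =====

-- B replaces A's pairwise consecutive-difference scan by building the expected arithmetic
-- progression and one whole-list equality comparison (alternative decomposition, same cost).


-- ===== PORT A =====
def func (num_list : List Int) : String :=
  match PySem.List.pyGet? num_list 1, PySem.List.pyGet? num_list 0 with
  | some a1, some a0 =>
    let offset := a1 - a0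
    if offset.natAbs ≠ 1 then "mixed"
    else if (PySem.List.pyRange 2 (num_list.length) 1).any
        (fun i => PySem.List.pyGetD num_list i 0 - PySem.List.pyGetD num_list (i-1) 0 != offset)
      then "mixed"
    else if offset = 1 then "ascending" else "descending"
  | _, _ => "mixed"  -- unreachable under Pre_func (Python raises IndexError)

-- ===== PORT B =====
def func_alt (num_list : List Int) : String :=
  match PySem.List.pyGet? num_list 1 with
  | none => "mixed"  -- unreachable under Pre_func (Python raises IndexError)
  | some a1 =>
    match PySem.List.pyGet? num_list 0 with
    | none => "mixed"  -- unreachable under Pre_func (Python raises IndexError)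
    | some a0 =>
      let offset := a1 - a0
      if offset.natAbs ≠ 1 then "mixed"
      else
        let expected := (PySem.List.pyRange 0 (num_list.length) 1).map (fun i => a0 + offset * i)
        if num_list = expected then (if offset = 1 then "ascending" else "descending")
        else "mixed"

-- ===== PRECONDITION & SPEC =====
-- Pre_ excludes exactly the inputs (fewer than two elements) on which A raises IndexError.
def Pre_func (num_list : List Int) : Prop := 2 ≤ num_list.length
instance (num_list : List Int) : Decidable (Pre_func num_list) := by unfold Pre_func; infer_instance
def pvWitness_func : List Int := [3, 2, 1]

def Spec_func (num_list : List Int) (out : String) : Prop := out = func_alt num_list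
instance (num_list : List Int) (out : String) : Decidable (Spec_func num_list out) := by unfold Spec_func; infer_instance

-- ===== CLAIM (what is proved, stated in full; the proofs are below) =====
def Claim_equal_func : Prop := ∀ (num_list : List Int), Dom_func num_list → Pre_func num_list → Spec_func num_list (func num_list)

-- ===== LEMMAS AND PROOFS =====

-- the arithmetic heart: all consecutive differences from index 2 on equal `off`
-- iff every element equals the arithmetic progression started at xs.getD 0 with step `off`
lemma key (xs : List Int) (off : Int) (h1 : xs.getD 1 0 - xs.getD 0 0 = off) :
    (∀ k : Nat, 2 ≤ k → k < xs.length → xs.getD k 0 - xs.getD (k-1) 0 = off) ↔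
    (∀ k : Nat, k < xs.length → xs.getD k 0 = xs.getD 0 0 + off * k) := by
  constructor
  · intro hA k
    induction k with
    | zero => intro _; simp
    | succ k ih =>
      intro hlt
      match k, ih with
      | 0, _ => push_cast; linarith
      | j+1, ih =>
        have hstep := hA (j+2) (by omega) hlt
        have hprev := ih (by omega)
        have hc : ((j+2 : Nat) : Int) = ((j+1 : Nat) : Int) + 1 := by push_cast; ring
        rw [hc]
        have hk1 : (j+2) - 1 = j + 1 := by omega
        rw [hk1] at hstep
        linarith [mul_add off ((j+1 : Nat) : Int) 1]
  · intro hB k h2k hk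
    have e1 := hB k hk
    have e2 := hB (k-1) (by omega)
    have hc : ((k-1 : Nat) : Int) = (k : Int) - 1 := by omega
    rw [e1, e2, hc]; ring

theorem func_spec_aux (num_list : List Int) (h : 2 ≤ num_list.length) :
    func num_list = func_alt num_list := by
  have h0 : PySem.List.pyGet? num_list 0 = some (num_list.getD 0 0) := by
    have := PySem.List.pyGet?_ofNat num_list 0 (by omega)
    simp only [Nat.cast_zero] at this
    rw [this, List.getD_eq_getElem?_getD, List.getElem?_eq_getElem (by omega)]; rfl
  have h1 : PySem.List.pyGet? num_list 1 = some (num_list.getD 1 0) := by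
    have := PySem.List.pyGet?_ofNat num_list 1 (by omega)
    simp only [Nat.cast_one] at this
    rw [this, List.getD_eq_getElem?_getD, List.getElem?_eq_getElem (by omega)]; rfl
  set a := num_list.getD 0 0 with ha
  set bb := num_list.getD 1 0 with hbb
  have hkey := key num_list (bb - a) (by rw [← ha, ← hbb])
  have hmain :
      ((PySem.List.pyRange 2 (num_list.length) 1).any
        (fun i => PySem.List.pyGetD num_list i 0 - PySem.List.pyGetD num_list (i-1) 0 != (bb - a)) = false) ↔
      (num_list = (PySem.List.pyRange 0 (num_list.length) 1).map (fun i => a + (bb - a) * i)) := by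
    rw [List.any_eq_false]
    constructor
    · intro hall
      apply List.ext_getElem
      · simp [PySem.List.length_pyRange_one]
      · intro k hk hk2
        rw [List.getElem_map, PySem.List.getElem_pyRange_one]
        have hstep : ∀ j : Nat, 2 ≤ j → j < num_list.length →
            num_list.getD j 0 - num_list.getD (j-1) 0 = (bb - a) := by
          intro j h2j hj
          have hmem : ((j : Int)) ∈ PySem.List.pyRange 2 (num_list.length) 1 := by
            rw [PySem.List.mem_pyRange_one]
            constructor
            · exact_mod_cast h2j
            · exact_mod_cast hj
          have hx := hall _ hmem
          have hj1 : ((j : Int)) - 1 = ((j - 1 : Nat) : Int) := by omega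
          rw [hj1] at hx
          simpa [PySem.List.pyGetD_natCast] using hx
        have hv := hkey.mp hstep k hk
        have hkd : num_list.getD k 0 = num_list[k] := by
          rw [List.getD_eq_getElem?_getD, List.getElem?_eq_getElem hk]; rfl
        rw [hkd] at hv
        rw [hv, ← ha]; ring
    · intro heq i hi
      rw [PySem.List.mem_pyRange_one] at hi
      obtain ⟨hi2, hin⟩ := hi
      have hprog : ∀ k : Nat, k < num_list.length →
          num_list.getD k 0 = num_list.getD 0 0 + (bb - a) * k := by
        intro k hk
        conv_lhs => rw [heq]
        rw [← PySem.List.pyGetD_natCast, PySem.List.pyGetD_map_pyRange _ _ _ _ hk, ← ha]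
      have hik : i = ((i.toNat : Nat) : Int) := by omega
      have hkn : i.toNat < num_list.length := by omega
      have h2k : 2 ≤ i.toNat := by omega
      have hv := hkey.mpr hprog i.toNat h2k hkn
      have hj1 : ((i.toNat : Nat) : Int) - 1 = ((i.toNat - 1 : Nat) : Int) := by omega
      rw [hik, hj1]
      simp only [PySem.List.pyGetD_natCast]
      rw [hv]
      simp
  simp only [func, func_alt, h0, h1]
  by_cases habs : (bb - a).natAbs ≠ 1
  · rw [if_pos habs, if_pos habs]
  · rw [if_neg habs, if_neg habs]
    cases hany : ((PySem.List.pyRange 2 (num_list.length) 1).any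
        (fun i => PySem.List.pyGetD num_list i 0 - PySem.List.pyGetD num_list (i-1) 0 != (bb - a))) with
    | true =>
      have hne : ¬ (num_list = (PySem.List.pyRange 0 (num_list.length) 1).map
          (fun i => a + (bb - a) * i)) := by
        intro hcontra
        rw [hmain.mpr hcontra] at hany
        exact Bool.false_ne_true hany
      simp only [if_true, if_neg hne]
    | false =>
      simp only [Bool.false_eq_true, if_false, if_pos (hmain.mp hany)]

-- ===== VERDICT (by name: the statement is the Claim_ definition above) =====
theorem func_spec : Claim_equal_func := by
  intro xs _ hpre
  exact func_spec_aux xs hpre
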